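-- pv_equiv track=rewrite | github.com/Gyaak/problem-solving | 백준/Gold/6068. 시간 관리하기/시간 관리하기.py | solve
-- ===== SOURCE A (Python) =====
-- def solve(inputs: list) -> int:
--     works = sorted(inputs, key=lambda x: -x[1])
--     res_time = works[0][1]
--     for work in works:
--         res_time = min(res_time, work[1]) - work[0]
--         if res_time < 0:
--             return -1
--     return res_time
-- ===== SOURCE B (Python) =====
-- def solve(inputs: list) -> int:
--     # Staged array pipeline instead of A's fused greedy recurrence with early exit:
--     # prefix sums of durations, deadline+prefix key array, running-minimum array,
--     # slack array, then a single min() test decides -1.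
--     works = sorted(inputs, key=lambda x: -x[1])
--     prefix = [0]
--     for t, _ in works:
--         prefix.append(prefix[-1] + t)
--     keys = [d + p for (_, d), p in zip(works, prefix)]
--     runmin = []
--     for k in keys:
--         runmin.append(k if not runmin or k < runmin[-1] else runmin[-1])
--     slacks = [m - p for m, p in zip(runmin, prefix[1:])]
--     return slacks[-1] if min(slacks) >= 0 else -1
-- ===== Notes on version B (the rewrite author's own statement) =====
-- stated objective: alternative
-- what changed: A's single fused loop carrying res = min(res, deadline) - duration with an early return is replaced by staged array passes: a prefix-sum array of durations, a deadline+prefix key array, a running-minimum array, a slack array, and one final min() test deciding -1; no greedy accumulator recurrence remains.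
-- outside the precondition, e.g. on solve([]): A raises IndexError, B raises ValueError
import Mathlib
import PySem

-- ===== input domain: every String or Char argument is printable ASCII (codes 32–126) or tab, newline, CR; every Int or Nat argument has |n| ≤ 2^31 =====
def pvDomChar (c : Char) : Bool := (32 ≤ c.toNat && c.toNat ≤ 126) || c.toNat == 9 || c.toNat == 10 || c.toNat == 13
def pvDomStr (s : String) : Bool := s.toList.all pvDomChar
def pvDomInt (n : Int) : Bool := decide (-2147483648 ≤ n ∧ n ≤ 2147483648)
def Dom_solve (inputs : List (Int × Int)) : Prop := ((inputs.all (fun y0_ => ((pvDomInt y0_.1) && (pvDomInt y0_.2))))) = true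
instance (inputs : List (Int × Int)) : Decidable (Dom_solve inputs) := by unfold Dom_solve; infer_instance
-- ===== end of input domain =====

-- B replaces A's fused greedy loop (carried min-slack accumulator with early return)
-- by staged array passes: prefix sums, deadline+prefix keys, running-minimum array,
-- slack array, one final min() test; equal return values proved on nonempty inputs.

-- ===== PORT A =====
-- A's for-loop with its early return -1
def solveLoopA (resTime : Int) : List (Int × Int) → Int
  | [] => resTime
  | (t, d) :: rest =>
    let r := min resTime d - t
    if r < 0 then -1 else solveLoopA r rest

def solve (inputs : List (Int × Int)) : Int :=
  let works := PySem.List.sorted inputs (fun x => -x.2)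
  match works with
  | [] => 0   -- works[0][1] raises IndexError in Python; excluded by Pre_solve
  | w :: _ => solveLoopA w.2 works

-- ===== PORT B =====
-- Source B: `prefix = [0]; for t, _ in works: prefix.append(prefix[-1] + t)`
-- (cur carries prefix[-1])
def prefLoopB (cur : Int) : List (Int × Int) → List Int
  | [] => []
  | (t, _) :: rest => (cur + t) :: prefLoopB (cur + t) rest

-- Source B: `runmin = []; for k in keys: runmin.append(k if not runmin or k < runmin[-1] else runmin[-1])`
-- (cur carries runmin[-1]; none = runmin still empty)
def rmLoopB (cur : Option Int) : List Int → List Int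
  | [] => []
  | k :: rest =>
    match cur with
    | none => k :: rmLoopB (some k) rest
    | some c => let m := if k < c then k else c; m :: rmLoopB (some m) rest

def solve_alt (inputs : List (Int × Int)) : Int :=
  let works := PySem.List.sorted inputs (fun x => -x.2)
  let pfx := 0 :: prefLoopB 0 works   -- Python variable `prefix` (keyword in Lean)
  let keys := (works.zip pfx).map (fun wp => wp.1.2 + wp.2)
  let runmin := rmLoopB none keys
  let slacks := (runmin.zip (PySem.List.slice pfx (some 1) none)).map (fun mp => mp.1 - mp.2)
  match PySem.List.min? slacks (fun y => y) with
  | none => 0   -- min([]) raises ValueError in Python; excluded by Pre_solve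
  | some m => if m ≥ 0 then PySem.List.pyGetD slacks (-1) 0 else -1

-- ===== PRECONDITION & SPEC =====
-- A raises IndexError on the empty list (works[0]); B raises there too (min of an empty
-- sequence). Only the empty input is excluded.
def Pre_solve (inputs : List (Int × Int)) : Prop := inputs.isEmpty = false
instance (inputs : List (Int × Int)) : Decidable (Pre_solve inputs) := by unfold Pre_solve; infer_instance
def pvWitness_solve : (List (Int × Int)) := [(2, 10), (3, 7)]

def Spec_solve (inputs : List (Int × Int)) (out : Int) : Prop := out = solve_alt inputs
instance (inputs : List (Int × Int)) (out : Int) : Decidable (Spec_solve inputs out) := by unfold Spec_solve; infer_instance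

-- ===== CLAIM (what is proved, stated in full; the proofs are below) =====
def Claim_equal_solve : Prop := ∀ (inputs : List (Int × Int)), Dom_solve inputs → Pre_solve inputs → Spec_solve inputs (solve inputs)

-- ===== LEMMAS AND PROOFS =====

-- the sequence of intermediate values of A's accumulator
def interA (r : Int) : List (Int × Int) → List Int
  | [] => []
  | (t, d) :: rest =>
    let r' := min r d - t
    r' :: interA r' rest

-- the key array, written recursively for the proofs
def keysF (cur : Int) : List (Int × Int) → List Int
  | [] => []
  | (t, d) :: rest => (d + cur) :: keysF (cur + t) rest

theorem keysF_eq : ∀ (l : List (Int × Int)) (cur : Int),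
    (l.zip (cur :: prefLoopB cur l)).map (fun wp => wp.1.2 + wp.2) = keysF cur l := by
  intro l
  induction l with
  | nil => intro cur; rfl
  | cons w rest ih =>
    intro cur
    obtain ⟨t, d⟩ := w
    simp only [prefLoopB, keysF, List.zip_cons_cons, List.map_cons]
    exact congrArg _ (ih (cur + t))

-- A's early-return loop in terms of its intermediate-value list
theorem loopA_char : ∀ (l : List (Int × Int)) (r : Int),
    solveLoopA r l =
      if (interA r l).any (fun x => decide (x < 0)) then -1 else (interA r l).getLastD r := by
  intro l
  induction l with
  | nil => intro r; rfl
  | cons w rest ih =>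
    intro r
    obtain ⟨t, d⟩ := w
    simp only [solveLoopA, interA, List.any_cons, List.getLastD_cons]
    by_cases h : min r d - t < 0
    · simp [h]
    · simp only [h, decide_false, Bool.false_or, if_false]
      exact ih (min r d - t)

-- fusion: B's zipped slack array is exactly A's intermediate-value list
theorem fuseB : ∀ (l : List (Int × Int)) (cur c : Int),
    ((rmLoopB (some c) (keysF cur l)).zip (prefLoopB cur l)).map (fun mp => mp.1 - mp.2)
      = interA (c - cur) l := by
  intro l
  induction l with
  | nil => intro cur c; rfl
  | cons w rest ih =>
    intro cur c
    obtain ⟨t, d⟩ := w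
    simp only [keysF, prefLoopB, rmLoopB, interA, List.zip_cons_cons, List.map_cons]
    have hm : (if d + cur < c then d + cur else c) = min c (d + cur) := by
      rcases le_or_gt c (d + cur) with h | h
      · rw [if_neg (by omega), min_eq_left h]
      · rw [if_pos h, min_eq_right (by omega)]
    have hr : min c (d + cur) - (cur + t) = min (c - cur) d - t := by
      rcases le_total (c - cur) d with h | h
      · rw [min_eq_left (by omega : c ≤ d + cur), min_eq_left h]; omega
      · rw [min_eq_right (by omega : d + cur ≤ c), min_eq_right h]; omega
    have htail := ih (cur + t) (min c (d + cur))
    rw [hr] at htail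
    rw [hm, hr, htail]

-- starting rmLoopB with none equals starting it with the first key
theorem rmLoopB_none (k : Int) (ks : List Int) :
    rmLoopB none (k :: ks) = rmLoopB (some k) (k :: ks) := by
  simp [rmLoopB]

-- 0 ≤ foldl min ↔ everything is nonnegative
theorem foldl_min_nonneg : ∀ (xs : List Int) (a : Int),
    0 ≤ xs.foldl min a ↔ 0 ≤ a ∧ ∀ x ∈ xs, 0 ≤ x := by
  intro xs
  induction xs with
  | nil => intro a; simp
  | cons x t ih =>
    intro a
    simp only [List.foldl_cons, ih, List.mem_cons]
    constructor
    · rintro ⟨h1, h2⟩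
      refine ⟨by omega, ?_⟩
      rintro y (rfl | hy)
      · omega
      · exact h2 y hy
    · rintro ⟨h1, h2⟩
      exact ⟨by have := h2 x (Or.inl rfl); omega, fun y hy => h2 y (Or.inr hy)⟩

-- getLastD of a nonempty list is its getLast
theorem getLastD_cons_eq_getLast (a d : Int) (l : List Int) :
    (a :: l).getLastD d = (a :: l).getLast (List.cons_ne_nil a l) := by
  induction l generalizing a with
  | nil => rfl
  | cons b tl ih =>
    rw [List.getLastD_cons, List.getLast_cons (List.cons_ne_nil b tl)]
    exact ih b

-- ===== VERDICT (by name: the statement is the Claim_ definition above) =====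
theorem solve_spec : Claim_equal_solve := by
  intro inputs hdom hpre
  unfold Pre_solve at hpre
  have hpre : inputs ≠ [] := by simpa using hpre
  unfold Spec_solve solve solve_alt
  cases hs : PySem.List.sorted inputs (fun x => -x.2) with
  | nil =>
    have hperm := PySem.List.sorted_perm inputs (fun x => -x.2) false
    rw [hs] at hperm
    exact absurd hperm.symm.eq_nil hpre
  | cons w rest =>
    obtain ⟨t, d⟩ := w
    simp only []
    rw [PySem.List.slice_from_one, List.tail_cons, keysF_eq]
    rw [show keysF 0 ((t, d) :: rest) = (d + 0) :: keysF (0 + t) rest from rfl]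
    rw [rmLoopB_none]
    have hfuse := fuseB ((t, d) :: rest) 0 (d + 0)
    rw [show keysF 0 ((t, d) :: rest) = (d + 0) :: keysF (0 + t) rest from rfl] at hfuse
    rw [hfuse]
    rw [loopA_char]
    have hd0 : d + 0 - 0 = d := by omega
    rw [hd0]
    -- interA d ((t,d)::rest) is a cons
    rw [show interA d ((t, d) :: rest) = (min d d - t) :: interA (min d d - t) rest from rfl]
    rw [PySem.List.min?_id_cons]
    have hiff := foldl_min_nonneg (interA (min d d - t) rest) (min d d - t)
    by_cases hneg : ((min d d - t) :: interA (min d d - t) rest).any (fun x => decide (x < 0))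
    · rw [if_pos hneg]
      have hlt : ¬ (List.foldl min (min d d - t) (interA (min d d - t) rest) ≥ 0) := by
        rw [ge_iff_le, hiff]
        simp only [List.any_eq_true, List.mem_cons, decide_eq_true_eq] at hneg
        rcases hneg with ⟨x, hx, hxlt⟩
        rcases hx with rfl | hx
        · rintro ⟨h1, _⟩; omega
        · rintro ⟨_, h2⟩; have := h2 x hx; omega
      show -1 = if List.foldl min (min d d - t) (interA (min d d - t) rest) ≥ 0 then
          PySem.List.pyGetD ((min d d - t) :: interA (min d d - t) rest) (-1) 0 else -1
      rw [if_neg hlt]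
    · rw [if_neg hneg]
      have hge : List.foldl min (min d d - t) (interA (min d d - t) rest) ≥ 0 := by
        rw [ge_iff_le, hiff]
        simp only [List.any_eq_true, List.mem_cons, decide_eq_true_eq, not_exists,
          not_and, not_lt] at hneg
        exact ⟨hneg (min d d - t) (Or.inl rfl), fun x hx => hneg x (Or.inr hx)⟩
      show ((min d d - t) :: interA (min d d - t) rest).getLastD d =
        if List.foldl min (min d d - t) (interA (min d d - t) rest) ≥ 0 then
          PySem.List.pyGetD ((min d d - t) :: interA (min d d - t) rest) (-1) 0 else -1
      rw [if_pos hge]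
      first
        | exact (getLastD_cons_eq_getLast _ _ _).trans
            (PySem.List.pyGetD_neg_one (List.cons_ne_nil _ _)).symm
        | exact (getLastD_cons_eq_getLast _ _ _).trans
            (PySem.List.pyGetD_neg_one _ (List.cons_ne_nil _ _)).symm
        | exact (getLastD_cons_eq_getLast _ _ _).trans
            (PySem.List.pyGetD_neg_one _ _ (List.cons_ne_nil _ _)).symm
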